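-- pv_equiv track=rewrite | github.com/Hsyst-Eleuthery/hps | hps_browser.py | parse_contract_info
-- ===== SOURCE A (Python) =====
-- def parse_contract_info(contract_text):
--     info = {'action': None, 'user': None, 'signature': None}
--     current_section = None
--     for line in contract_text.splitlines():
--         line = line.strip()
--         if line.startswith("### "):
--             if line.endswith(":"):
--                 current_section = line[4:-1].lower()
--         elif line.startswith("### :END "):
--             current_section = None
--         elif line.startswith("# "):
--             if current_section == "details" and line.startswith("# ACTION:"):
--                 info['action'] = line.split(":", 1)[1].strip()
--             elif current_section == "start" and line.startswith("# USER:"):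
--                 info['user'] = line.split(":", 1)[1].strip()
--             elif current_section == "start" and line.startswith("# SIGNATURE:"):
--                 info['signature'] = line.split(":", 1)[1].strip()
--     return info
-- ===== SOURCE B (Python) =====
-- def parse_contract_info(contract_text):
--     # Backward search per field: no running parser state; for each field take the
--     # last matching line whose enclosing section (nearest preceding header) fits.
--     lines = [l.strip() for l in contract_text.splitlines()]
--
--     def section_of(i):
--         for j in range(i - 1, -1, -1):
--             l = lines[j]
--             if l.startswith("### ") and l.endswith(":"):
--                 return l[4:-1].lower()
--         return None
--
--     def find(section, prefix):
--         for i in range(len(lines) - 1, -1, -1):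
--             if lines[i].startswith(prefix) and section_of(i) == section:
--                 return lines[i].split(":", 1)[1].strip()
--         return None
--
--     return {'action': find("details", "# ACTION:"),
--             'user': find("start", "# USER:"),
--             'signature': find("start", "# SIGNATURE:")}
-- ===== Notes on version B (the rewrite author's own statement) =====
-- stated objective: alternative
-- what changed: A threads a dict and a current-section state through one forward pass; B is stateless: for each of the three fields it scans the stripped lines backwards for the last matching field-prefix line and determines that line's section by searching backwards for the nearest preceding header, so the dead end-marker branch and the overwrite semantics disappear.
import Mathlib
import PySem

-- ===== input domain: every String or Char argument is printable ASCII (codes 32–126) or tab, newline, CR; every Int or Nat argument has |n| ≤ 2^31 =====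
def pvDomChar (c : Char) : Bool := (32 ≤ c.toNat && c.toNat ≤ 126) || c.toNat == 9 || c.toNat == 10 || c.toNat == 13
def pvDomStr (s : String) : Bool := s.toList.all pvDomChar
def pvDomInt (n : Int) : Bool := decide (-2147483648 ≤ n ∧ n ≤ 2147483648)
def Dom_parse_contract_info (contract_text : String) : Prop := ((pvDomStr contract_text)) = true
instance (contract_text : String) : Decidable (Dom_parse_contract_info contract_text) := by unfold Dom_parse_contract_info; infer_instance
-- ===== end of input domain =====

-- B replaces A's one-pass state machine by a stateless backward search per field
-- (nearest preceding header determines a line's section); objective: alternative.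

-- ===== PORT A =====

-- shared helper: line.split(":", 1)[1].strip() — every caller guards with a
-- prefix that contains ':', so the parts list has 2 elements and the getD
-- defaults are unreachable
def pvFieldVal (line : String) : String :=
  PySem.Str.strip ((PySem.List.pyGet? ((PySem.Str.splitMax? line ":" 1).getD []) 1).getD "")

-- shared helper: line[4:-1].lower()
def pvSectionName (line : String) : String :=
  PySem.Str.lower (PySem.Str.slice line (some 4) (some (-1)))

-- A's loop body on the already-stripped line (branches in A's order,
-- including the unreachable '### :END ' elif)
def pvStepLine (st : PySem.Dict String (Option String) × Option String) (line : String) :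
    PySem.Dict String (Option String) × Option String :=
  if PySem.Str.startswith line "### " then
    if PySem.Str.endswith line ":" then (st.1, some (pvSectionName line)) else st
  else if PySem.Str.startswith line "### :END " then
    (st.1, none)
  else if PySem.Str.startswith line "# " then
    if st.2 == some "details" && PySem.Str.startswith line "# ACTION:" then
      (st.1.insert "action" (some (pvFieldVal line)), st.2)
    else if st.2 == some "start" && PySem.Str.startswith line "# USER:" then
      (st.1.insert "user" (some (pvFieldVal line)), st.2)
    else if st.2 == some "start" && PySem.Str.startswith line "# SIGNATURE:" then
      (st.1.insert "signature" (some (pvFieldVal line)), st.2)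
    else st
  else st

def pvStepA (st : PySem.Dict String (Option String) × Option String) (rawLine : String) :
    PySem.Dict String (Option String) × Option String :=
  pvStepLine st (PySem.Str.strip rawLine)

def parse_contract_info (contract_text : String) : List (String × Option String) :=
  let init : PySem.Dict String (Option String) :=
    PySem.Dict.ofList [("action", none), ("user", none), ("signature", none)]
  ((PySem.Str.splitlines contract_text).foldl pvStepA (init, none)).1.items

-- ===== PORT B =====

-- section_of: scan j = i-1 … 0 for the nearest header; argument is the
-- reversed list of the stripped lines before position i
def pvSectionOfRev : List String → Option String
  | [] => none
  | l :: rest =>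
    if PySem.Str.startswith l "### " && PySem.Str.endswith l ":" then some (pvSectionName l)
    else pvSectionOfRev rest

-- find: scan i = len-1 … 0; argument is the reversed list of stripped lines
def pvFindRev (sec : String) (pfx : String) : List String → Option String
  | [] => none
  | l :: rest =>
    if PySem.Str.startswith l pfx && (pvSectionOfRev rest == some sec) then
      some (pvFieldVal l)
    else pvFindRev sec pfx rest

def parse_contract_info_alt (contract_text : String) : List (String × Option String) :=
  let rev := ((PySem.Str.splitlines contract_text).map PySem.Str.strip).reverse
  [("action", pvFindRev "details" "# ACTION:" rev),
   ("user", pvFindRev "start" "# USER:" rev),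
   ("signature", pvFindRev "start" "# SIGNATURE:" rev)]

-- ===== PRECONDITION & SPEC =====
def Spec_parse_contract_info (contract_text : String) (out : List (String × Option String)) : Prop := out = parse_contract_info_alt contract_text
instance (contract_text : String) (out : List (String × Option String)) : Decidable (Spec_parse_contract_info contract_text out) := by unfold Spec_parse_contract_info; infer_instance

-- ===== CLAIM (what is proved, stated in full; the proofs are below) =====
def Claim_equal_parse_contract_info : Prop := ∀ (contract_text : String), Dom_parse_contract_info contract_text → Spec_parse_contract_info contract_text (parse_contract_info contract_text)

-- ===== LEMMAS AND PROOFS =====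

-- the dict literal A threads through its fold
def pvD (a u g : Option String) : PySem.Dict String (Option String) :=
  PySem.Dict.ofList [("action", a), ("user", u), ("signature", g)]

-- generalized B-side scans with an arbitrary fallback section sec0
def pvSecG (sec0 : Option String) : List String → Option String
  | [] => sec0
  | l :: rest =>
    if PySem.Str.startswith l "### " && PySem.Str.endswith l ":" then some (pvSectionName l)
    else pvSecG sec0 rest

def pvFindG (sec0 : Option String) (sec : String) (pfx : String) : List String → Option String
  | [] => none
  | l :: rest =>
    if PySem.Str.startswith l pfx && (pvSecG sec0 rest == some sec) then some (pvFieldVal l)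
    else pvFindG sec0 sec pfx rest

lemma pvSecG_none (R : List String) : pvSecG none R = pvSectionOfRev R := by
  induction R with
  | nil => rfl
  | cons l rest ih => simp [pvSecG, pvSectionOfRev, ih]

lemma pvFindG_none (sec pfx : String) (R : List String) :
    pvFindG none sec pfx R = pvFindRev sec pfx R := by
  induction R with
  | nil => rfl
  | cons l rest ih => simp [pvFindG, pvFindRev, ih, pvSecG_none]

lemma pv_sw_trans (l p q : String) (h : PySem.Str.startswith l p = true)
    (hq : q.toList <+: p.toList) : PySem.Str.startswith l q = true := by
  simp only [PySem.Str.startswith_eq, PySem.Chars.startswith_iff] at h ⊢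
  exact hq.trans h

lemma pv_sw_excl (l p q : String) (h : PySem.Str.startswith l p = true)
    (h1 : ¬ p.toList <+: q.toList) (h2 : ¬ q.toList <+: p.toList) :
    PySem.Str.startswith l q = false := by
  simp only [PySem.Str.startswith_eq, PySem.Chars.startswith_iff] at h
  simp only [PySem.Str.startswith_eq]
  cases hcb : PySem.Chars.startswith l.toList q.toList with
  | false => rfl
  | true =>
    exfalso
    have hc := (PySem.Chars.startswith_iff l.toList q.toList).mp hcb
    rcases List.prefix_or_prefix_of_prefix hc h with hx | hx
    · exact h2 hx
    · exact h1 hx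

lemma pvD_insert_action (a u g v : Option String) :
    (pvD a u g).insert "action" v = pvD v u g := by
  simp [pvD, PySem.Dict.ofList, PySem.Dict.insert, PySem.Dict.empty, PySem.Dict.update,
    PySem.Dict.contains]

lemma pvD_insert_user (a u g v : Option String) :
    (pvD a u g).insert "user" v = pvD a v g := by
  simp [pvD, PySem.Dict.ofList, PySem.Dict.insert, PySem.Dict.empty, PySem.Dict.update,
    PySem.Dict.contains]

lemma pvD_insert_signature (a u g v : Option String) :
    (pvD a u g).insert "signature" v = pvD a u v := by
  simp [pvD, PySem.Dict.ofList, PySem.Dict.insert, PySem.Dict.empty, PySem.Dict.update,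
    PySem.Dict.contains]

lemma pvD_items (a u g : Option String) :
    (pvD a u g).items = [("action", a), ("user", u), ("signature", g)] := by
  simp [pvD, PySem.Dict.ofList, PySem.Dict.empty, PySem.Dict.update, PySem.Dict.insert,
    PySem.Dict.contains]

-- master invariant: A's fold over the stripped lines, read right-to-left
set_option maxHeartbeats 1600000 in
lemma pv_master (R : List String) (a u g sec0 : Option String) :
    R.reverse.foldl pvStepLine (pvD a u g, sec0) =
      (pvD ((pvFindG sec0 "details" "# ACTION:" R).elim a some)
           ((pvFindG sec0 "start" "# USER:" R).elim u some)
           ((pvFindG sec0 "start" "# SIGNATURE:" R).elim g some),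
       pvSecG sec0 R) := by
  induction R generalizing a u g with
  | nil => simp [pvSecG, pvFindG]
  | cons l R' ih =>
    rw [List.reverse_cons, List.foldl_append, ih]
    simp only [List.foldl_cons, List.foldl_nil]
    by_cases hH : PySem.Str.startswith l "### " = true
    · have hnA : PySem.Str.startswith l "# ACTION:" = false :=
        pv_sw_excl l _ _ hH (by decide) (by decide)
      have hnU : PySem.Str.startswith l "# USER:" = false :=
        pv_sw_excl l _ _ hH (by decide) (by decide)
      have hnG : PySem.Str.startswith l "# SIGNATURE:" = false :=
        pv_sw_excl l _ _ hH (by decide) (by decide)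
      by_cases hC : PySem.Str.endswith l ":" = true
      · simp_all [pvStepLine, pvSecG, pvFindG]
      · simp_all [pvStepLine, pvSecG, pvFindG]
    · have hH' : PySem.Str.startswith l "### " = false := by simpa using hH
      have hnE : PySem.Str.startswith l "### :END " = false := by
        cases he : PySem.Str.startswith l "### :END " with
        | false => rfl
        | true => exact absurd (pv_sw_trans l "### :END " "### " he (by decide)) hH
      by_cases hP : PySem.Str.startswith l "# " = true
      · by_cases hA : PySem.Str.startswith l "# ACTION:" = true
        · have hnU : PySem.Str.startswith l "# USER:" = false :=
            pv_sw_excl l _ _ hA (by decide) (by decide)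
          have hnG : PySem.Str.startswith l "# SIGNATURE:" = false :=
            pv_sw_excl l _ _ hA (by decide) (by decide)
          by_cases hS : pvSecG sec0 R' = some "details"
          · simp_all [pvStepLine, pvSecG, pvFindG, pvD_insert_action]
          · simp_all [pvStepLine, pvSecG, pvFindG]
        · have hA' : PySem.Str.startswith l "# ACTION:" = false := by simpa using hA
          by_cases hU : PySem.Str.startswith l "# USER:" = true
          · have hnG : PySem.Str.startswith l "# SIGNATURE:" = false :=
              pv_sw_excl l _ _ hU (by decide) (by decide)
            by_cases hS : pvSecG sec0 R' = some "start"
            · simp_all [pvStepLine, pvSecG, pvFindG, pvD_insert_user]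
            · simp_all [pvStepLine, pvSecG, pvFindG]
          · have hU' : PySem.Str.startswith l "# USER:" = false := by simpa using hU
            by_cases hG : PySem.Str.startswith l "# SIGNATURE:" = true
            · by_cases hS : pvSecG sec0 R' = some "start"
              · simp_all [pvStepLine, pvSecG, pvFindG, pvD_insert_signature]
              · simp_all [pvStepLine, pvSecG, pvFindG]
            · have hG' : PySem.Str.startswith l "# SIGNATURE:" = false := by simpa using hG
              simp_all [pvStepLine, pvSecG, pvFindG]
      · have hP' : PySem.Str.startswith l "# " = false := by simpa using hP
        have hnA : PySem.Str.startswith l "# ACTION:" = false := by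
          cases he : PySem.Str.startswith l "# ACTION:" with
          | false => rfl
          | true => exact absurd (pv_sw_trans l "# ACTION:" "# " he (by decide)) hP
        have hnU : PySem.Str.startswith l "# USER:" = false := by
          cases he : PySem.Str.startswith l "# USER:" with
          | false => rfl
          | true => exact absurd (pv_sw_trans l "# USER:" "# " he (by decide)) hP
        have hnG : PySem.Str.startswith l "# SIGNATURE:" = false := by
          cases he : PySem.Str.startswith l "# SIGNATURE:" with
          | false => rfl
          | true => exact absurd (pv_sw_trans l "# SIGNATURE:" "# " he (by decide)) hP
        simp_all [pvStepLine, pvSecG, pvFindG]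

-- ===== VERDICT (by name: the statement is the Claim_ definition above) =====
theorem parse_contract_info_spec : Claim_equal_parse_contract_info := by
  intro s _
  unfold Spec_parse_contract_info parse_contract_info parse_contract_info_alt
  have hmap : (PySem.Str.splitlines s).foldl pvStepA
      (PySem.Dict.ofList [("action", none), ("user", none), ("signature", none)], none) =
      ((PySem.Str.splitlines s).map PySem.Str.strip).foldl pvStepLine (pvD none none none, none) := by
    rw [List.foldl_map]; rfl
  have hrev := pv_master (((PySem.Str.splitlines s).map PySem.Str.strip).reverse) none none none none
  rw [List.reverse_reverse] at hrev
  simp only [hmap, hrev, pvD_items, pvFindG_none]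
  rcases hA : pvFindRev "details" "# ACTION:" (((PySem.Str.splitlines s).map PySem.Str.strip).reverse) <;>
  rcases hU : pvFindRev "start" "# USER:" (((PySem.Str.splitlines s).map PySem.Str.strip).reverse) <;>
  rcases hG : pvFindRev "start" "# SIGNATURE:" (((PySem.Str.splitlines s).map PySem.Str.strip).reverse) <;>
  simp
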